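-- pv_equiv track=rewrite | github.com/YuvalDellus/IntroToCS | learning_to_test/2015_moed_b.py | filtered_subsets
-- ===== SOURCE A (Python) =====
-- def subsets(lst):
--     if len(lst)==0:
--         yield []
--     else:
--         for tail in subsets(lst[1:]):
--             yield tail
--             yield [lst[0]]+tail
--
-- def filtered_subsets(lst,max_sum):
--
--     a = subsets(lst)
--
--     def fun1(x):
--         if sum(x) <= max_sum:
--             return True
--         else:
--             return False
--
--     b = filter(fun1,a)
--
--     for i in b:
--         yield i
-- ===== SOURCE B (Python) =====
-- def filtered_subsets(lst, max_sum):
--     n = len(lst)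
--     for mask in range(2 ** n):
--         sub = [lst[i] for i in range(n) if mask >> i & 1]
--         if sum(sub) <= max_sum:
--             yield sub
-- ===== Notes on version B (the rewrite author's own statement) =====
-- stated objective: idiomatic
-- what changed: Replaces the recursive subsets generator plus a filter object by a flat loop over integer bitmasks 0..2^n-1 (bit i selects lst[i]), yielding each selected sublist directly when its sum fits.
import Mathlib
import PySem

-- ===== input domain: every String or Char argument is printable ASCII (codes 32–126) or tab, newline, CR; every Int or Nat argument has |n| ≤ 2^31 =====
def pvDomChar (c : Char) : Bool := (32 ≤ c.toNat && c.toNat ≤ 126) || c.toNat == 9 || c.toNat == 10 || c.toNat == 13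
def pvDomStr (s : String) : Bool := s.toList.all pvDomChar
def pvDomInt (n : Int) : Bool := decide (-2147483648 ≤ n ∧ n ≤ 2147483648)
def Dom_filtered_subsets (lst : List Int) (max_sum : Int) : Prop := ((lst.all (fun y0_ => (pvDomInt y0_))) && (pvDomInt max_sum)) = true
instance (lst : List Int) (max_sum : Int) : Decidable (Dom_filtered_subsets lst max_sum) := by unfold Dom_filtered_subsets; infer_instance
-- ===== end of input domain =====

-- ===== PORT A =====
-- Header: B enumerates subsets by integer bitmask in one flat loop instead of A's
-- recursive generator + filter object; same output, same order (idiomatic rewrite).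
-- port of A's recursive generator `subsets`
def subsetsA : List Int → List (List Int)
  | [] => [[]]
  | x :: xs => (subsetsA xs).flatMap (fun tail => [tail, x :: tail])

def filtered_subsets (lst : List Int) (max_sum : Int) : List (List Int) :=
  (subsetsA lst).filter (fun x => decide (x.sum ≤ max_sum))

-- ===== PORT B =====
-- sub = [lst[i] for i in range(n) if mask >> i & 1]
def maskSub (lst : List Int) (mask : Nat) : List Int :=
  ((List.range lst.length).filter (fun i => mask >>> i &&& 1 == 1)).map
    (fun i => lst.getD i 0)

def filtered_subsets_alt (lst : List Int) (max_sum : Int) : List (List Int) :=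
  (List.range (2 ^ lst.length)).filterMap (fun mask =>
    let sub := maskSub lst mask
    if sub.sum ≤ max_sum then some sub else none)

-- ===== PRECONDITION & SPEC =====
def Spec_filtered_subsets (lst : List Int) (max_sum : Int) (out : List (List Int)) : Prop := out = filtered_subsets_alt lst max_sum
instance (lst : List Int) (max_sum : Int) (out : List (List Int)) : Decidable (Spec_filtered_subsets lst max_sum out) := by unfold Spec_filtered_subsets; infer_instance

-- ===== CLAIM (what is proved, stated in full; the proofs are below) =====
def Claim_equal_filtered_subsets : Prop := ∀ (lst : List Int) (max_sum : Int), Dom_filtered_subsets lst max_sum → Spec_filtered_subsets lst max_sum (filtered_subsets lst max_sum)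

-- ===== LEMMAS AND PROOFS =====

theorem pvRangeTwoMul (k : Nat) :
    List.range (2 * k) = (List.range k).flatMap (fun m => [2 * m, 2 * m + 1]) := by
  induction k with
  | zero => simp
  | succ k ih =>
      have h : 2 * (k + 1) = (2 * k) + 1 + 1 := by omega
      rw [h, List.range_succ, List.range_succ, List.range_succ, ih]
      simp [List.flatMap_append]

theorem pvShiftSucc (mask i : Nat) : mask >>> (i + 1) = (mask >>> 1) >>> i := by
  rw [← Nat.shiftRight_add, Nat.add_comm]

theorem maskSub_cons (x : Int) (xs : List Int) (mask : Nat) :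
    maskSub (x :: xs) mask =
      (if mask &&& 1 == 1 then [x] else []) ++ maskSub xs (mask >>> 1) := by
  have hfil : List.filter (fun i => mask >>> i % 2 == 1)
        (List.map Nat.succ (List.range xs.length))
      = List.map Nat.succ
        (List.filter (fun i => mask >>> 1 >>> i % 2 == 1) (List.range xs.length)) := by
    rw [List.filter_map]
    congr 1
    apply List.filter_congr
    intro i _
    have : mask >>> Nat.succ i = mask >>> 1 >>> i := pvShiftSucc mask i
    simp [Function.comp, this]
  by_cases h : mask % 2 = 1 <;>
    simp [maskSub, List.range_succ_eq_map, Nat.and_one_is_mod, h, hfil,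
      List.map_map, Function.comp, Nat.succ_eq_add_one]

theorem maskSub_even (x : Int) (xs : List Int) (m : Nat) :
    maskSub (x :: xs) (2 * m) = maskSub xs m := by
  rw [maskSub_cons]
  have h1 : (2 * m) &&& 1 = 0 := by rw [Nat.and_one_is_mod]; omega
  have h2 : (2 * m) >>> 1 = m := by rw [Nat.shiftRight_one]; omega
  simp [h1, h2]

theorem maskSub_odd (x : Int) (xs : List Int) (m : Nat) :
    maskSub (x :: xs) (2 * m + 1) = x :: maskSub xs m := by
  rw [maskSub_cons]
  have h1 : (2 * m + 1) &&& 1 = 1 := by rw [Nat.and_one_is_mod]; omega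
  have h2 : (2 * m + 1) >>> 1 = m := by rw [Nat.shiftRight_one]; omega
  simp [h1, h2]

theorem subsetsA_eq_masks (lst : List Int) :
    subsetsA lst = (List.range (2 ^ lst.length)).map (maskSub lst) := by
  induction lst with
  | nil => simp [subsetsA, maskSub]
  | cons x xs ih =>
      have hp : 2 ^ (x :: xs).length = 2 * 2 ^ xs.length := by
        simp [List.length_cons, pow_succ]; ring
      rw [subsetsA, ih, hp, pvRangeTwoMul]
      rw [List.flatMap_map, List.map_flatMap]
      congr 1
      funext m
      simp [maskSub_even, maskSub_odd]

theorem filterMap_if_eq (max_sum : Int) (f : Nat → List Int) (l : List Nat) :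
    l.filterMap (fun m => if (f m).sum ≤ max_sum then some (f m) else none) =
      (l.map f).filter (fun x => decide (x.sum ≤ max_sum)) := by
  induction l with
  | nil => rfl
  | cons a l ih =>
      simp only [List.filterMap_cons, List.map_cons, List.filter_cons]
      by_cases h : (f a).sum ≤ max_sum <;> simp [h, ih]

-- ===== VERDICT (by name: the statement is the Claim_ definition above) =====
theorem filtered_subsets_spec : Claim_equal_filtered_subsets := by
  intro lst max_sum _
  unfold Spec_filtered_subsets
  simp only [filtered_subsets, filtered_subsets_alt]
  rw [subsetsA_eq_masks, filterMap_if_eq]
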